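-- pv_equiv track=rewrite | github.com/dengyuhk/SketchBeautification | utils/vector_resize.py | get_final_stroke
-- ===== SOURCE A (Python) =====
-- def get_final_stroke(points, labels, order):
--     final_stroke = []
--     final_label = []
--     stroke = []
--     label = []
--     part_id = order[0]
--     for index, point in enumerate(points):
--         if part_id != order[index]:
--             final_stroke.append(stroke)
--             final_label.append(label)
--             part_id = order[index]
--             stroke = []
--             label = []
--             stroke.append(point)
--             label.append(labels[index])
--         else:
--             stroke.append(point)
--             label.append(labels[index])
--
--     final_stroke.append(stroke)
--     final_label.append(label)
--     return final_stroke, final_label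
-- ===== SOURCE B (Python) =====
-- def get_final_stroke(points, labels, order):
--     n = len(points)
--     final_stroke = []
--     final_label = []
--     i = 0
--     while i < n:
--         j = i + 1
--         while j < n and order[j] == order[i]:
--             j += 1
--         final_stroke.append(points[i:j])
--         final_label.append(labels[i:j])
--         i = j
--     return final_stroke, final_label
-- ===== Notes on version B (the rewrite author's own statement) =====
-- stated objective: alternative
-- what changed: Replaces A's accumulate-and-flush fold (growing a current stroke element by element and flushing it at each order-value change, plus a trailing append) by a two-pointer run scanner that finds each maximal run [i, j) of equal order values and emits points[i:j] / labels[i:j] as slices.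
-- outside the precondition, e.g. on get_final_stroke([], [], [0]): A returns ([[]], [[]]), B returns ([], [])
import Mathlib
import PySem

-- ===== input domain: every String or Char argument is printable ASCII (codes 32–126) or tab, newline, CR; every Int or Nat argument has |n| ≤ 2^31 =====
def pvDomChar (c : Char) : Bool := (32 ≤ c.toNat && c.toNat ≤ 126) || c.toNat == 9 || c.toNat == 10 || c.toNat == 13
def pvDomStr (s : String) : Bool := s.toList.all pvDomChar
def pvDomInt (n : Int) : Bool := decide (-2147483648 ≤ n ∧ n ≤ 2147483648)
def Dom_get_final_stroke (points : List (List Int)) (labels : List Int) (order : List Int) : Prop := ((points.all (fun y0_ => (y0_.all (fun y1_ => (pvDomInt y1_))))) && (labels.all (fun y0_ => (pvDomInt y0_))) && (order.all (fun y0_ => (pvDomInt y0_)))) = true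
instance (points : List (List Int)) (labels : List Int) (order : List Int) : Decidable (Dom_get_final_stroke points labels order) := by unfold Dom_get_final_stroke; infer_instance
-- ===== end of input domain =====

-- B replaces A's accumulate-and-flush fold by a two-pointer maximal-run scanner that
-- emits points[i:j] / labels[i:j] as slices (objective: alternative, same cost).

-- ===== PORT A =====
-- the loop body of A: state (final_stroke, final_label, stroke, label, part_id), one enumerate step
def aStep (labels order : List Int)
    (st : List (List (List Int)) × List (List Int) × List (List Int) × List Int × Int)
    (ip : Int × List Int) :
    List (List (List Int)) × List (List Int) × List (List Int) × List Int × Int :=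
  match st, ip with
  | (fs, fl, stroke, label, part_id), (index, point) =>
    if part_id ≠ PySem.List.pyGetD order index 0 then
      (fs ++ [stroke], fl ++ [label], [point], [PySem.List.pyGetD labels index 0],
        PySem.List.pyGetD order index 0)
    else
      (fs, fl, stroke ++ [point], label ++ [PySem.List.pyGetD labels index 0], part_id)

-- the two trailing appends and the return
def aFinish (st : List (List (List Int)) × List (List Int) × List (List Int) × List Int × Int) :
    List (List (List Int)) × List (List Int) :=
  (st.1 ++ [st.2.2.1], st.2.1 ++ [st.2.2.2.1])

def get_final_stroke (points : List (List Int)) (labels : List Int) (order : List Int) : List (List (List Int)) × List (List Int) :=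
  aFinish ((PySem.List.enumerate points 0).foldl (aStep labels order)
    ([], [], [], [], PySem.List.pyGetD order 0 0))

-- ===== PORT B =====
-- the inner while loop: first j ≥ start with j = n or order[j] ≠ the run's value
def runEnd (order : List Int) (n : Nat) (v : Int) (j : Nat) : Nat :=
  if h : j < n ∧ PySem.List.pyGetD order (j : Int) 0 = v then runEnd order n v (j + 1) else j
termination_by n - j
decreasing_by omega

-- needed by altLoop's termination proof
theorem le_runEnd (order : List Int) (n : Nat) (v : Int) (j : Nat) : j ≤ runEnd order n v j := by
  rw [runEnd]
  split
  next h => exact Nat.le_trans (by omega) (le_runEnd order n v (j + 1))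
  next _ => exact Nat.le_refl j
termination_by n - j
decreasing_by omega

-- the outer while loop of B
def altLoop (points : List (List Int)) (labels : List Int) (order : List Int) (n i : Nat)
    (fs : List (List (List Int))) (fl : List (List Int)) :
    List (List (List Int)) × List (List Int) :=
  if _h : i < n then
    let j := runEnd order n (PySem.List.pyGetD order (i : Int) 0) (i + 1)
    altLoop points labels order n j
      (fs ++ [PySem.List.slice points (some (i : Int)) (some (j : Int))])
      (fl ++ [PySem.List.slice labels (some (i : Int)) (some (j : Int))])
  else (fs, fl)
termination_by n - i
decreasing_by
  have := le_runEnd order n (PySem.List.pyGetD order (i : Int) 0) (i + 1)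
  omega

def get_final_stroke_alt (points : List (List Int)) (labels : List Int) (order : List Int) : List (List (List Int)) × List (List Int) :=
  altLoop points labels order points.length 0 [] []

-- ===== PRECONDITION & SPEC =====
-- Pre_ excludes inputs where A raises IndexError (empty order, or order/labels shorter than
-- points), and additionally the empty-points corner, on which whether the result holds one
-- empty group (A returns ([[]], [[]])) or no group at all (B returns ([], [])) is an
-- unspecified corner with either choice defensible.
def Pre_get_final_stroke (points : List (List Int)) (labels : List Int) (order : List Int) : Prop :=
  points ≠ [] ∧ points.length ≤ labels.length ∧ points.length ≤ order.length
instance (points : List (List Int)) (labels : List Int) (order : List Int) : Decidable (Pre_get_final_stroke points labels order) := by unfold Pre_get_final_stroke; infer_instance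

def pvWitness_get_final_stroke : List (List Int) × List Int × List Int :=
  ([[1, 2], [3, 4], [5, 6]], [0, 0, 1], [7, 7, 8])

def Spec_get_final_stroke (points : List (List Int)) (labels : List Int) (order : List Int) (out : List (List (List Int)) × List (List Int)) : Prop := out = get_final_stroke_alt points labels order
instance (points : List (List Int)) (labels : List Int) (order : List Int) (out : List (List (List Int)) × List (List Int)) : Decidable (Spec_get_final_stroke points labels order out) := by unfold Spec_get_final_stroke; infer_instance

-- ===== CLAIM (what is proved, stated in full; the proofs are below) =====
def Claim_equal_get_final_stroke : Prop := ∀ (points : List (List Int)) (labels : List Int) (order : List Int), Dom_get_final_stroke points labels order → Pre_get_final_stroke points labels order → Spec_get_final_stroke points labels order (get_final_stroke points labels order)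

-- ===== LEMMAS AND PROOFS =====

theorem runEnd_cont (order : List Int) (n : Nat) (v : Int) (j : Nat)
    (h : j < n ∧ PySem.List.pyGetD order (j : Int) 0 = v) :
    runEnd order n v j = runEnd order n v (j + 1) := by
  rw [runEnd, dif_pos h]

theorem runEnd_stop (order : List Int) (n : Nat) (v : Int) (j : Nat)
    (h : ¬ (j < n ∧ PySem.List.pyGetD order (j : Int) 0 = v)) :
    runEnd order n v j = j := by
  rw [runEnd, dif_neg h]

-- the key invariant: from state (fs, fl, s, l, order[i]) just after index i, A's remaining
-- fold extends the current run to its end and then agrees with B's outer loop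
theorem keyC (points : List (List Int)) (labels order : List Int)
    (hl : points.length ≤ labels.length) (_ho : points.length ≤ order.length) :
    ∀ (m i : Nat), points.length - i ≤ m → i < points.length →
      ∀ (fs : List (List (List Int))) (fl : List (List Int)) (s : List (List Int)) (l : List Int),
      aFinish ((PySem.List.enumerate (points.drop (i + 1)) ((i : Int) + 1)).foldl
          (aStep labels order) (fs, fl, s, l, order.getD i 0))
      = altLoop points labels order points.length (runEnd order points.length (order.getD i 0) (i + 1))
          (fs ++ [s ++ (points.drop (i + 1)).take (runEnd order points.length (order.getD i 0) (i + 1) - (i + 1))])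
          (fl ++ [l ++ (labels.drop (i + 1)).take (runEnd order points.length (order.getD i 0) (i + 1) - (i + 1))]) := by
  intro m
  induction m with
  | zero => intro i h0 hi; exact absurd hi (by omega)
  | succ m ih =>
    intro i hm hi fs fl s l
    by_cases hin : i + 1 < points.length
    · -- another element at index i+1
      have hdrop : points.drop (i + 1) = points[i + 1] :: points.drop (i + 2) :=
        List.drop_eq_getElem_cons hin
      have hldrop : labels.drop (i + 1) = labels[i + 1]'(by omega) :: labels.drop (i + 2) :=
        List.drop_eq_getElem_cons (by omega)
      have hpgo : PySem.List.pyGetD order ((i : Int) + 1) 0 = order.getD (i + 1) 0 := by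
        rw [show ((i : Int) + 1) = ((i + 1 : Nat) : Int) by push_cast; ring,
          PySem.List.pyGetD_natCast]
      have hpgl : PySem.List.pyGetD labels ((i : Int) + 1) 0 = labels[i + 1]'(by omega) := by
        rw [show ((i : Int) + 1) = ((i + 1 : Nat) : Int) by push_cast; ring,
          PySem.List.pyGetD_natCast, List.getD_eq_getElem _ _ (by omega)]
      by_cases heq : order.getD (i + 1) 0 = order.getD i 0
      · -- same run continues at i+1
        have ihv := ih (i + 1) (by omega) hin fs fl (s ++ [points[i + 1]])
          (l ++ [labels[i + 1]'(by omega)])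
        simp only [show i + 1 + 1 = i + 2 from by omega] at ihv
        have hj2 : i + 2 ≤ runEnd order points.length (order.getD (i + 1) 0) (i + 2) :=
          le_runEnd order points.length _ (i + 2)
        rw [hdrop, PySem.List.enumerate_cons]
        simp only [List.foldl_cons]
        rw [show aStep labels order (fs, fl, s, l, order.getD i 0) ((i : Int) + 1, points[i + 1])
            = (fs, fl, s ++ [points[i + 1]], l ++ [labels[i + 1]'(by omega)], order.getD i 0) by
          simp only [aStep, hpgo, hpgl]
          rw [if_neg (fun hc => hc heq.symm)]]
        rw [show order.getD i 0 = order.getD (i + 1) 0 from heq.symm]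
        rw [show ((i : Int) + 1 + 1) = (((i + 1 : Nat) : Int) + 1) by push_cast; ring]
        rw [ihv]
        rw [runEnd_cont order points.length (order.getD (i + 1) 0) (i + 1)
          ⟨hin, by rw [PySem.List.pyGetD_natCast]⟩]
        rw [hldrop]
        rw [show runEnd order points.length (order.getD (i + 1) 0) (i + 2) - (i + 1)
            = (runEnd order points.length (order.getD (i + 1) 0) (i + 2) - (i + 2)) + 1 by omega]
        simp only [show i + 1 + 1 = i + 2 from by omega, List.take_succ_cons,
          List.append_assoc, List.cons_append, List.nil_append]
      · -- run boundary at i+1: A flushes the run, B emits a slice and restarts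
        have ihv := ih (i + 1) (by omega) hin (fs ++ [s]) (fl ++ [l])
          [points[i + 1]] [labels[i + 1]'(by omega)]
        simp only [show i + 1 + 1 = i + 2 from by omega] at ihv
        have hj2 : i + 2 ≤ runEnd order points.length (order.getD (i + 1) 0) (i + 2) :=
          le_runEnd order points.length _ (i + 2)
        have hre : runEnd order points.length (order.getD i 0) (i + 1) = i + 1 := by
          apply runEnd_stop
          rw [PySem.List.pyGetD_natCast]
          exact fun hc => heq hc.2
        rw [hdrop, PySem.List.enumerate_cons]
        simp only [List.foldl_cons]
        rw [show aStep labels order (fs, fl, s, l, order.getD i 0) ((i : Int) + 1, points[i + 1])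
            = (fs ++ [s], fl ++ [l], [points[i + 1]], [labels[i + 1]'(by omega)],
                order.getD (i + 1) 0) by
          simp only [aStep, hpgo, hpgl]
          rw [if_pos (fun hc => heq hc.symm)]]
        rw [show ((i : Int) + 1 + 1) = (((i + 1 : Nat) : Int) + 1) by push_cast; ring]
        rw [ihv, hre]
        simp only [Nat.sub_self, List.take_zero, List.append_nil]
        conv_rhs => rw [altLoop]
        rw [dif_pos hin]
        simp only [PySem.List.pyGetD_natCast, show i + 1 + 1 = i + 2 from by omega,
          PySem.List.slice_natCast]
        rw [hdrop, hldrop]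
        rw [show runEnd order points.length (order.getD (i + 1) 0) (i + 2) - (i + 1)
            = (runEnd order points.length (order.getD (i + 1) 0) (i + 2) - (i + 2)) + 1 by omega]
        simp only [List.take_succ_cons,
          List.append_assoc, List.cons_append, List.nil_append]
    · -- i was the last index: the fold is done and B's loop stops at i+1 = n
      have hre : runEnd order points.length (order.getD i 0) (i + 1) = i + 1 := by
        apply runEnd_stop; omega
      rw [show points.drop (i + 1) = [] from List.drop_eq_nil_of_le (by omega)]
      rw [PySem.List.enumerate_nil]
      simp only [List.foldl_nil]
      rw [hre, altLoop, dif_neg (by omega)]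
      simp [aFinish]
theorem get_final_stroke_spec : Claim_equal_get_final_stroke := by
  intro points labels order hdom hpre
  obtain ⟨hne, hl, ho⟩ := hpre
  have hn : 0 < points.length := List.length_pos_iff.mpr hne
  unfold Spec_get_final_stroke get_final_stroke get_final_stroke_alt
  have hcons : points = points[0] :: points.drop 1 := by
    have := List.drop_eq_getElem_cons (l := points) hn; simpa using this
  have hlcons : labels = labels[0]'(by omega) :: labels.drop 1 := by
    have := List.drop_eq_getElem_cons (l := labels) (by omega : 0 < labels.length)
    simpa using this
  have hpg0 : PySem.List.pyGetD order 0 0 = order.getD 0 0 := PySem.List.pyGetD_zero ..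
  have hlg0 : PySem.List.pyGetD labels 0 0 = labels[0]'(by omega) := by
    rw [PySem.List.pyGetD_zero, List.getD_eq_getElem _ _ (by omega)]
  have hj1 : 1 ≤ runEnd order points.length (order.getD 0 0) 1 :=
    le_runEnd order points.length _ 1
  conv_lhs => rw [hcons]
  rw [PySem.List.enumerate_cons]
  simp only [List.foldl_cons]
  rw [show aStep labels order ([], [], [], [], PySem.List.pyGetD order 0 0) (0, points[0])
      = ([], [], [points[0]], [labels[0]'(by omega)], order.getD 0 0) by
    simp only [aStep]
    rw [if_neg (fun hc => hc rfl)]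
    simp [hpg0, hlg0]]
  have hk := keyC points labels order hl ho points.length 0 (by omega) hn
    [] [] [points[0]] [labels[0]'(by omega)]
  rw [show ((0 : Nat) : Int) + 1 = (0 : Int) + 1 by norm_num] at hk
  rw [show points.drop (0 + 1) = points.drop 1 from rfl] at hk
  rw [hk]
  conv_rhs => rw [altLoop]
  rw [dif_pos hn]
  rw [show PySem.List.pyGetD order ((0 : Nat) : Int) 0 = order.getD 0 0 from
    PySem.List.pyGetD_natCast ..]
  simp only [PySem.List.slice_natCast, List.drop_zero, Nat.sub_zero, List.nil_append]
  simp only [show (0 : Nat) + 1 = 1 from rfl]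
  obtain ⟨k, hk2⟩ : ∃ k, runEnd order points.length (order.getD 0 0) 1 = k + 1 :=
    ⟨runEnd order points.length (order.getD 0 0) 1 - 1, by omega⟩
  rw [hk2]
  rw [show k + 1 - 1 = k from by omega]
  rw [show List.take (k + 1) points = points[0] :: List.take k (points.drop 1) by
    conv_lhs => rw [hcons]
    rw [List.take_succ_cons]]
  rw [show List.take (k + 1) labels = labels[0]'(by omega) :: List.take k (labels.drop 1) by
    conv_lhs => rw [hlcons]
    rw [List.take_succ_cons]]
  simp only [List.cons_append, List.nil_append]
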